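-- pv_equiv track=rewrite | github.com/Vladymyr-Chuchkanov/DMAP_2025 | one_rule.py | fill_friction_table
-- ===== SOURCE A (Python) =====
-- def fill_friction_table(data):
--     friction_tables = {}
--
--     for row in data:
--         for i in range(len(row) - 1):
--             target = row[-1]
--             if i not in friction_tables.keys():
--                 friction_tables[i] = {}
--
--             if row[i] not in friction_tables[i].keys():
--                 friction_tables[i][row[i]] = {}
--
--             if target not in friction_tables[i][row[i]].keys():
--                 friction_tables[i][row[i]][target] = 0
--
--             friction_tables[i][row[i]][target] += 1
--     return friction_tables
-- ===== SOURCE B (Python) =====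
-- def fill_friction_table(data):
--     # pass 1: flat counter keyed by (column, value, target)
--     counter = {}
--     for row in data:
--         for i in range(len(row) - 1):
--             key = (i, row[i], row[-1])
--             counter[key] = counter.get(key, 0) + 1
--     # pass 2: reshape the flat counter into the nested table
--     friction_tables = {}
--     for (i, val, target), count in counter.items():
--         friction_tables.setdefault(i, {}).setdefault(val, {})[target] = count
--     return friction_tables
-- ===== Notes on version B (the rewrite author's own statement) =====
-- stated objective: alternative
-- what changed: A builds the nested dict-of-dict-of-dict table incrementally with membership checks inside the row loop; B first builds a flat counter keyed by (column, value, target) tuples in one pass and then reshapes the flat counter into the nested table in a second, differently-shaped pass over its items.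
import Mathlib
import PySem

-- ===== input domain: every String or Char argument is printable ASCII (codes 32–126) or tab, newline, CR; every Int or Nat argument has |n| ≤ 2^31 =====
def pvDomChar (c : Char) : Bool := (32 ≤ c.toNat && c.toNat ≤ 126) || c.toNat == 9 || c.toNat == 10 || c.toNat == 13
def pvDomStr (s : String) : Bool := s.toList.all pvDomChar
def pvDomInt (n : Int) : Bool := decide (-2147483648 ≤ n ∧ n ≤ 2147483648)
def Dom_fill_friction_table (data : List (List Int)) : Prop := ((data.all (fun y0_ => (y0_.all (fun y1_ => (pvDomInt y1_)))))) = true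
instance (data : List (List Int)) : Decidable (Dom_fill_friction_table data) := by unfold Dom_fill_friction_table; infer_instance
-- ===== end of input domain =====

-- B replaces A's incremental nested-dict build by a flat (column, value, target) counter pass
-- followed by a separate reshape pass over the counter's items (objective: alternative decomposition).

-- Shared: the nested dict-of-dict-of-dict table type and its flattening to the declared return type.
abbrev pvND3 : Type := PySem.Dict Int Int
abbrev pvND2 : Type := PySem.Dict Int pvND3
abbrev pvND1 : Type := PySem.Dict Int pvND2
abbrev pvK : Type := Int × Int × Int
def pvOut (d : pvND1) : List (Int × List (Int × List (Int × Int))) :=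
  d.items.map (fun p => (p.1, p.2.items.map (fun q => (q.1, q.2.items))))

-- ===== PORT A =====
-- body of A's inner loop; row[-1] and row[i] are always in range here (the loop runs only for 0 ≤ i < len(row)-1)
def pvStepA (ft : pvND1) (row : List Int) (i : Int) : pvND1 :=
  let target := (PySem.List.pyGet? row (-1)).getD 0
  let v := (PySem.List.pyGet? row i).getD 0
  let ft := if ft.contains i then ft else ft.insert i PySem.Dict.empty
  let m1 := ft.getD i PySem.Dict.empty
  let m1 := if m1.contains v then m1 else m1.insert v PySem.Dict.empty
  let m2 := m1.getD v PySem.Dict.empty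
  let m2 := if m2.contains target then m2 else m2.insert target 0
  let m2 := m2.insert target (m2.getD target 0 + 1)
  ft.insert i (m1.insert v m2)

def fill_friction_table (data : List (List Int)) : List (Int × List (Int × List (Int × Int))) :=
  pvOut (data.foldl
    (fun ft row => (PySem.List.pyRange 0 ((row.length : Int) - 1) 1).foldl
      (fun ft i => pvStepA ft row i) ft)
    PySem.Dict.empty)

-- ===== PORT B =====
-- pass 1 step: counter[key] = counter.get(key, 0) + 1 with key = (i, row[i], row[-1])
def pvStepFlat (c : PySem.Dict pvK Int) (row : List Int) (i : Int) : PySem.Dict pvK Int :=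
  let k : pvK := (i, (PySem.List.pyGet? row i).getD 0, (PySem.List.pyGet? row (-1)).getD 0)
  c.insert k (c.getD k 0 + 1)

-- pass 2 step: friction_tables.setdefault(i, {}).setdefault(val, {})[target] = count
def pvStepB (ft : pvND1) (p : pvK × Int) : pvND1 :=
  let ft := ft.setdefault p.1.1 PySem.Dict.empty
  let m1 := (ft.getD p.1.1 PySem.Dict.empty).setdefault p.1.2.1 PySem.Dict.empty
  ft.insert p.1.1 (m1.insert p.1.2.1 ((m1.getD p.1.2.1 PySem.Dict.empty).insert p.1.2.2 p.2))

def fill_friction_table_alt (data : List (List Int)) : List (Int × List (Int × List (Int × Int))) :=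
  let counter : PySem.Dict pvK Int := data.foldl
    (fun c row => (PySem.List.pyRange 0 ((row.length : Int) - 1) 1).foldl
      (fun c i => pvStepFlat c row i) c)
    PySem.Dict.empty
  pvOut (counter.items.foldl pvStepB PySem.Dict.empty)

-- ===== PRECONDITION & SPEC =====
def Spec_fill_friction_table (data : List (List Int)) (out : List (Int × List (Int × List (Int × Int)))) : Prop := out = fill_friction_table_alt data
instance (data : List (List Int)) (out : List (Int × List (Int × List (Int × Int)))) : Decidable (Spec_fill_friction_table data out) := by unfold Spec_fill_friction_table; infer_instance

-- ===== CLAIM (what is proved, stated in full; the proofs are below) =====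
def Claim_equal_fill_friction_table : Prop := ∀ (data : List (List Int)), Dom_fill_friction_table data → Spec_fill_friction_table data (fill_friction_table data)

-- ===== LEMMAS AND PROOFS =====

-- normalized single-key update of the nested table, and the lookup/presence notions the invariant uses
def pvSetN2 (m1 : pvND2) (v t c : Int) : pvND2 :=
  m1.insert v ((m1.getD v PySem.Dict.empty).insert t c)
def pvSetN (d : pvND1) (k : pvK) (c : Int) : pvND1 :=
  d.insert k.1 (pvSetN2 (d.getD k.1 PySem.Dict.empty) k.2.1 k.2.2 c)
def pvLook (d : pvND1) (k : pvK) : Int :=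
  ((d.getD k.1 PySem.Dict.empty).getD k.2.1 PySem.Dict.empty).getD k.2.2 0
def pvPres (d : pvND1) (k : pvK) : Prop :=
  d.contains k.1 = true ∧ (d.getD k.1 PySem.Dict.empty).contains k.2.1 = true ∧
    ((d.getD k.1 PySem.Dict.empty).getD k.2.1 PySem.Dict.empty).contains k.2.2 = true
def pvReshape (c : List (pvK × Int)) (d : pvND1) : pvND1 :=
  c.foldl (fun d p => pvSetN d p.1 p.2) d

theorem pv_insert_comm {κ ν : Type} [BEq κ] [LawfulBEq κ] (d : PySem.Dict κ ν)
    (k k' : κ) (w w' : ν) (hne : k ≠ k') (h : d.contains k = true) :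
    (d.insert k w).insert k' w' = (d.insert k' w').insert k w := by
  have hkk' : (k == k') = false := by simp [hne]
  have hk'k : (k' == k) = false := by simp [Ne.symm hne]
  apply PySem.Dict.ext
  by_cases hc' : d.contains k' = true
  · rw [PySem.Dict.items_insert_of_contains _ w'
        (by rw [PySem.Dict.contains_insert]; simp [hc']),
      PySem.Dict.items_insert_of_contains _ w h,
      PySem.Dict.items_insert_of_contains _ w
        (by rw [PySem.Dict.contains_insert]; simp [h]),
      PySem.Dict.items_insert_of_contains _ w' hc',
      List.map_map, List.map_map]
    apply List.map_congr_left
    intro p _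
    simp only [Function.comp]
    by_cases h1 : (p.1 == k) = true
    · have e1 : p.1 = k := beq_iff_eq.mp h1
      simp [e1, hkk']
    · by_cases h2 : (p.1 == k') = true
      · have e2 : p.1 = k' := beq_iff_eq.mp h2
        simp [e2, hk'k]
      · simp [h1, h2]
  · have hc'f : d.contains k' = false := by simpa using hc'
    rw [PySem.Dict.items_insert_of_not_contains _ w'
        (by rw [PySem.Dict.contains_insert]; simp [hk'k, hc'f]),
      PySem.Dict.items_insert_of_contains _ w h,
      PySem.Dict.items_insert_of_contains _ w
        (by rw [PySem.Dict.contains_insert]; simp [h]),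
      PySem.Dict.items_insert_of_not_contains _ w' hc'f,
      List.map_append]
    simp [hk'k]

theorem pv_stepA_norm (ft : pvND1) (row : List Int) (i : Int) :
    pvStepA ft row i =
      pvSetN ft (i, (PySem.List.pyGet? row i).getD 0, (PySem.List.pyGet? row (-1)).getD 0)
        (pvLook ft (i, (PySem.List.pyGet? row i).getD 0, (PySem.List.pyGet? row (-1)).getD 0) + 1) := by
  set t := (PySem.List.pyGet? row (-1)).getD 0 with ht
  set v := (PySem.List.pyGet? row i).getD 0 with hv
  simp only [pvStepA, pvSetN, pvSetN2, pvLook]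
  by_cases h1 : PySem.Dict.contains ft i = true
  · rw [if_pos h1]
    by_cases h2 : PySem.Dict.contains (PySem.Dict.getD ft i PySem.Dict.empty) v = true
    · rw [if_pos h2]
      by_cases h3 : PySem.Dict.contains
          (PySem.Dict.getD (PySem.Dict.getD ft i PySem.Dict.empty) v PySem.Dict.empty) t = true
      · rw [if_pos h3]
      · rw [if_neg h3]
        have h3f : PySem.Dict.contains
            (PySem.Dict.getD (PySem.Dict.getD ft i PySem.Dict.empty) v PySem.Dict.empty) t = false :=
          by simpa using h3
        have e3 : PySem.Dict.getD
            (PySem.Dict.getD (PySem.Dict.getD ft i PySem.Dict.empty) v PySem.Dict.empty) t 0 = 0 :=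
          PySem.Dict.getD_of_not_contains _ _ h3f
        rw [PySem.Dict.getD_insert_self, PySem.Dict.insert_insert_self, e3]
    · rw [if_neg h2]
      have h2f : PySem.Dict.contains (PySem.Dict.getD ft i PySem.Dict.empty) v = false :=
        by simpa using h2
      have e2 : PySem.Dict.getD (PySem.Dict.getD ft i PySem.Dict.empty) v PySem.Dict.empty
          = PySem.Dict.empty := PySem.Dict.getD_of_not_contains _ _ h2f
      rw [PySem.Dict.getD_insert_self, if_neg (by simp), PySem.Dict.getD_insert_self,
        PySem.Dict.insert_insert_self, PySem.Dict.insert_insert_self, e2]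
      simp only [PySem.Dict.getD_empty, ← hv, ← ht]
  · rw [if_neg h1]
    have h1f : PySem.Dict.contains ft i = false := by simpa using h1
    have e1 : PySem.Dict.getD ft i PySem.Dict.empty = PySem.Dict.empty :=
      PySem.Dict.getD_of_not_contains _ _ h1f
    rw [PySem.Dict.getD_insert_self, if_neg (by simp), PySem.Dict.getD_insert_self,
      if_neg (by simp), PySem.Dict.getD_insert_self, PySem.Dict.insert_insert_self,
      PySem.Dict.insert_insert_self, PySem.Dict.insert_insert_self, e1]
    simp only [PySem.Dict.getD_empty, ← hv, ← ht]

theorem pv_stepB_norm (ft : pvND1) (p : pvK × Int) : pvStepB ft p = pvSetN ft p.1 p.2 := by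
  simp only [pvStepB, pvSetN, pvSetN2]
  by_cases h1 : PySem.Dict.contains ft p.1.1 = true
  · rw [PySem.Dict.setdefault_of_contains _ _ h1]
    by_cases h2 : PySem.Dict.contains (PySem.Dict.getD ft p.1.1 PySem.Dict.empty) p.1.2.1 = true
    · rw [PySem.Dict.setdefault_of_contains _ _ h2]
    · have h2f : PySem.Dict.contains (PySem.Dict.getD ft p.1.1 PySem.Dict.empty) p.1.2.1 = false :=
        by simpa using h2
      have e2 : PySem.Dict.getD (PySem.Dict.getD ft p.1.1 PySem.Dict.empty) p.1.2.1
          PySem.Dict.empty = PySem.Dict.empty := PySem.Dict.getD_of_not_contains _ _ h2f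
      rw [PySem.Dict.setdefault_of_not_contains _ _ h2f, PySem.Dict.getD_insert_self,
        PySem.Dict.insert_insert_self, e2]
  · have h1f : PySem.Dict.contains ft p.1.1 = false := by simpa using h1
    have e1 : PySem.Dict.getD ft p.1.1 PySem.Dict.empty = PySem.Dict.empty :=
      PySem.Dict.getD_of_not_contains _ _ h1f
    rw [PySem.Dict.setdefault_of_not_contains _ _ h1f, PySem.Dict.getD_insert_self,
      PySem.Dict.setdefault_of_not_contains _ _ (PySem.Dict.contains_empty _),
      PySem.Dict.getD_insert_self, PySem.Dict.insert_insert_self,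
      PySem.Dict.insert_insert_self, e1, PySem.Dict.getD_empty]

theorem pv_setN_setN_self (d : pvND1) (k : pvK) (n m : Int) :
    pvSetN (pvSetN d k n) k m = pvSetN d k m := by
  simp only [pvSetN, pvSetN2, PySem.Dict.getD_insert_self, PySem.Dict.insert_insert_self]

theorem pv_look_setN (d : pvND1) (k k' : pvK) (c : Int) :
    pvLook (pvSetN d k' c) k = if k = k' then c else pvLook d k := by
  obtain ⟨i, v, t⟩ := k
  obtain ⟨i', v', t'⟩ := k'
  simp only [pvLook, pvSetN, pvSetN2, PySem.Dict.getD_insert, Prod.mk.injEq]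
  split_ifs <;> simp_all [PySem.Dict.getD_insert_self, PySem.Dict.getD_insert]
  split_ifs <;> simp_all [PySem.Dict.getD_insert]

theorem pv_pres_setN_self (d : pvND1) (k : pvK) (c : Int) : pvPres (pvSetN d k c) k := by
  obtain ⟨i, v, t⟩ := k
  simp only [pvPres, pvSetN, pvSetN2, PySem.Dict.getD_insert_self,
    PySem.Dict.contains_insert]
  simp

theorem pv_pres_setN_mono (d : pvND1) (k k' : pvK) (c : Int) (h : pvPres d k) :
    pvPres (pvSetN d k' c) k := by
  obtain ⟨i, v, t⟩ := k
  obtain ⟨i', v', t'⟩ := k'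
  obtain ⟨h1, h2, h3⟩ := h
  simp only [pvPres, pvSetN, pvSetN2, PySem.Dict.getD_insert, PySem.Dict.contains_insert] at *
  by_cases e1 : i = i' <;> by_cases e2 : v = v' <;> by_cases e3 : t = t' <;>
    simp_all [PySem.Dict.getD_insert, PySem.Dict.getD_insert_self, PySem.Dict.contains_insert]

theorem pv_setN_comm (d : pvND1) (k k' : pvK) (c c' : Int) (hne : k ≠ k') (h : pvPres d k) :
    pvSetN (pvSetN d k c) k' c' = pvSetN (pvSetN d k' c') k c := by
  obtain ⟨i, v, t⟩ := k
  obtain ⟨i', v', t'⟩ := k'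
  obtain ⟨h1, h2, h3⟩ := h
  by_cases e1 : i = i'
  · subst e1
    simp only [pvSetN, pvSetN2, PySem.Dict.getD_insert_self, PySem.Dict.insert_insert_self]
    by_cases e2 : v = v'
    · subst e2
      have e3 : t ≠ t' := by simpa using hne  -- hne with i, v equal forces t ≠ t'
      simp only [PySem.Dict.getD_insert_self, PySem.Dict.insert_insert_self]
      rw [pv_insert_comm _ t t' _ _ e3 h3]
    · have hg : ∀ (X : pvND3), (PySem.Dict.insert (PySem.Dict.getD d i PySem.Dict.empty) v X).getD v'
          PySem.Dict.empty = (PySem.Dict.getD d i PySem.Dict.empty).getD v' PySem.Dict.empty := by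
        intro X; rw [PySem.Dict.getD_insert]; simp [Ne.symm e2]
      have hg' : ∀ (X : pvND3), (PySem.Dict.insert (PySem.Dict.getD d i PySem.Dict.empty) v' X).getD v
          PySem.Dict.empty = (PySem.Dict.getD d i PySem.Dict.empty).getD v PySem.Dict.empty := by
        intro X; rw [PySem.Dict.getD_insert]; simp [e2]
      rw [hg, hg', pv_insert_comm _ v v' _ _ e2 h2]
  · simp only [pvSetN, pvSetN2]
    have hg : ∀ (X : pvND2), (PySem.Dict.insert d i X).getD i' PySem.Dict.empty
        = d.getD i' PySem.Dict.empty := by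
      intro X; rw [PySem.Dict.getD_insert]; simp [Ne.symm e1]
    have hg' : ∀ (X : pvND2), (PySem.Dict.insert d i' X).getD i PySem.Dict.empty
        = d.getD i PySem.Dict.empty := by
      intro X; rw [PySem.Dict.getD_insert]; simp [e1]
    rw [hg, hg', pv_insert_comm _ i i' _ _ e1 h1]

theorem pv_reshape_setN (c₂ : List (pvK × Int)) (d : pvND1) (k : pvK) (m : Int)
    (h : ∀ p ∈ c₂, p.1 ≠ k) (hp : pvPres d k) :
    pvReshape c₂ (pvSetN d k m) = pvSetN (pvReshape c₂ d) k m := by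
  induction c₂ generalizing d with
  | nil => rfl
  | cons p rest ih =>
    simp only [pvReshape, List.foldl_cons] at *
    rw [pv_setN_comm d k p.1 m p.2 (Ne.symm (h p (List.mem_cons_self))) hp,
      ih _ (fun q hq => h q (List.mem_cons_of_mem _ hq)) (pv_pres_setN_mono _ _ _ _ hp)]

theorem pv_look_reshape (c : List (pvK × Int)) (d : pvND1) (k : pvK)
    (hnd : (c.map (·.1)).Nodup) :
    pvLook (pvReshape c d) k = ((PySem.Dict.mk c).get? k).getD (pvLook d k) := by
  induction c generalizing d with
  | nil =>
    have he : (PySem.Dict.mk ([] : List (pvK × Int))) = PySem.Dict.empty := rfl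
    simp [pvReshape, he, PySem.Dict.get?_empty]
  | cons p rest ih =>
    obtain ⟨hk, hrest⟩ := List.nodup_cons.mp hnd
    simp only [pvReshape, List.foldl_cons] at *
    rw [ih _ hrest, PySem.Dict.get?_mk_cons, pv_look_setN]
    by_cases e : k = p.1
    · have hnone : (PySem.Dict.mk rest).get? k = none := by
        rw [PySem.Dict.get?_eq_none_iff_not_mem_keys]
        simpa [PySem.Dict.keys_mk, e] using hk
      have hnone' : (PySem.Dict.mk rest).get? p.1 = none := e ▸ hnone
      simp [e, hnone']
    · simp [e, Ne.symm e]

theorem pv_reshape_map (c : List (pvK × Int)) (d : pvND1) (k : pvK) (m : Int)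
    (hnd : (c.map (·.1)).Nodup) (hk : k ∈ c.map (·.1)) :
    pvReshape (c.map (fun p => if (p.1 == k) = true then (k, m) else p)) d
      = pvSetN (pvReshape c d) k m := by
  induction c generalizing d with
  | nil => simp at hk
  | cons p rest ih =>
    obtain ⟨hp1, hrest⟩ := List.nodup_cons.mp hnd
    simp only [pvReshape, List.map_cons, List.foldl_cons] at *
    by_cases e : p.1 = k
    · have hnok : ∀ q ∈ rest, q.1 ≠ k := by
        intro q hq hqe
        exact hp1 (by rw [e, ← hqe]; exact List.mem_map_of_mem hq)
      have hmap : rest.map (fun p => if (p.1 == k) = true then (k, m) else p) = rest := by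
        have := List.map_congr_left (l := rest)
          (f := fun p : pvK × Int => if (p.1 == k) = true then (k, m) else p) (g := id)
          (by intro q hq; simp [hnok q hq])
        simpa using this
      rw [if_pos (by simp [e]), hmap]
      show pvReshape rest (pvSetN d k m) = pvSetN (pvReshape rest (pvSetN d p.1 p.2)) k m
      rw [e] at *
      rw [← pv_reshape_setN rest (pvSetN d k p.2) k m hnok (pv_pres_setN_self d k p.2),
        pv_setN_setN_self]
    · rw [if_neg (by simp [e])]
      exact ih (pvSetN d p.1 p.2) hrest (by
        rcases List.mem_cons.mp hk with h | h
        · exact absurd h.symm e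
        · exact h)

theorem pv_commute (cd : PySem.Dict pvK Int) (k : pvK) (hnd : cd.keys.Nodup) :
    pvReshape ((cd.insert k (cd.getD k 0 + 1)).items) PySem.Dict.empty
      = pvSetN (pvReshape cd.items PySem.Dict.empty) k
          (pvLook (pvReshape cd.items PySem.Dict.empty) k + 1) := by
  have heta : PySem.Dict.mk cd.items = cd := rfl
  by_cases hc : cd.contains k = true
  · have hnd' : (cd.items.map (·.1)).Nodup := hnd
    have hk : k ∈ cd.items.map (·.1) := PySem.Dict.contains_iff_mem_keys cd k |>.mp hc
    rw [PySem.Dict.items_insert_of_contains _ _ hc, pv_reshape_map _ _ k _ hnd' hk]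
    congr 1
    rw [pv_look_reshape _ _ _ hnd', heta, PySem.Dict.getD_eq_get?_getD]
    simp [pvLook, PySem.Dict.getD_empty]
  · have hcf : cd.contains k = false := by simpa using hc
    rw [PySem.Dict.items_insert_of_not_contains _ _ hcf,
      PySem.Dict.getD_of_not_contains _ _ hcf]
    have happ : pvReshape (cd.items ++ [(k, 0 + 1)]) PySem.Dict.empty
        = pvSetN (pvReshape cd.items PySem.Dict.empty) k (0 + 1) := by
      simp only [pvReshape, List.foldl_append, List.foldl_cons, List.foldl_nil]
    rw [happ]
    congr 1
    rw [pv_look_reshape _ _ _ hnd, heta]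
    have hnone : cd.get? k = none := by
      rw [PySem.Dict.get?_eq_none_iff_not_mem_keys]
      intro hmem
      rw [(PySem.Dict.contains_iff_mem_keys cd k).mpr hmem] at hcf
      simp at hcf
    simp [hnone, pvLook, PySem.Dict.getD_empty]

theorem pv_inner (is : List Int) (row : List Int) (cd : PySem.Dict pvK Int)
    (hnd : cd.keys.Nodup) :
    is.foldl (fun ft i => pvStepA ft row i) (pvReshape cd.items PySem.Dict.empty)
      = pvReshape ((is.foldl (fun c i => pvStepFlat c row i) cd).items) PySem.Dict.empty := by
  induction is generalizing cd with
  | nil => rfl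
  | cons i rest ih =>
    simp only [List.foldl_cons]
    rw [pv_stepA_norm, ← pv_commute cd _ hnd]
    exact ih (pvStepFlat cd row i)
      (PySem.Dict.nodup_keys_insert cd _ _ hnd)

theorem pv_nodup_inner (is : List Int) (row : List Int) (cd : PySem.Dict pvK Int)
    (hnd : cd.keys.Nodup) : (is.foldl (fun c i => pvStepFlat c row i) cd).keys.Nodup := by
  induction is generalizing cd with
  | nil => exact hnd
  | cons i rest ih =>
    exact ih (pvStepFlat cd row i) (PySem.Dict.nodup_keys_insert cd _ _ hnd)

theorem pv_outer (data : List (List Int)) (cd : PySem.Dict pvK Int) (hnd : cd.keys.Nodup) :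
    data.foldl (fun ft row => (PySem.List.pyRange 0 ((row.length : Int) - 1) 1).foldl
        (fun ft i => pvStepA ft row i) ft) (pvReshape cd.items PySem.Dict.empty)
      = pvReshape ((data.foldl (fun c row => (PySem.List.pyRange 0 ((row.length : Int) - 1) 1).foldl
          (fun c i => pvStepFlat c row i) c) cd).items) PySem.Dict.empty := by
  induction data generalizing cd with
  | nil => rfl
  | cons row rows ih =>
    simp only [List.foldl_cons]
    rw [pv_inner _ row cd hnd]
    exact ih _ (pv_nodup_inner _ row cd hnd)

-- ===== VERDICT (by name: the statement is the Claim_ definition above) =====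
theorem fill_friction_table_spec : Claim_equal_fill_friction_table := by
  intro data _
  unfold Spec_fill_friction_table fill_friction_table fill_friction_table_alt
  have hB : pvStepB = fun ft p => pvSetN ft p.1 p.2 :=
    funext fun ft => funext fun p => pv_stepB_norm ft p
  show pvOut _ = pvOut _
  rw [hB]
  congr 1
  exact pv_outer data PySem.Dict.empty PySem.Dict.nodup_keys_empty
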